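-- pv_equiv track=rewrite | github.com/dskrypa/wiki_nodes | lib/wiki_nodes/nodes/handlers/base.py | _with_parent_domains
-- ===== SOURCE A (Python) =====
-- from typing import TYPE_CHECKING, Type, Union, Optional, TypeVar, Generic
--
-- OptStr = Optional[str]
--
-- def _with_parent_domains(site: str) -> list[OptStr]:
--     sites = [site]
--     while site:
--         try:
--             site = site.split('.', 1)[1]
--         except IndexError:
--             break
--         else:
--             sites.append(site)
--
--     sites.append(None)
--     return sites
-- ===== SOURCE B (Python) =====
-- def _with_parent_domains(site: str) -> list:
--     labels = site.split('.')
--     return [('.'.join(labels[i:])) for i in range(len(labels))] + [None]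
-- ===== Notes on version B (the rewrite author's own statement) =====
-- stated objective: simpler
-- what changed: Replaces the incremental strip-one-label while-loop guarded by try/except IndexError with a single full split('.') followed by a comprehension that rejoins each index suffix.
import Mathlib
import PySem

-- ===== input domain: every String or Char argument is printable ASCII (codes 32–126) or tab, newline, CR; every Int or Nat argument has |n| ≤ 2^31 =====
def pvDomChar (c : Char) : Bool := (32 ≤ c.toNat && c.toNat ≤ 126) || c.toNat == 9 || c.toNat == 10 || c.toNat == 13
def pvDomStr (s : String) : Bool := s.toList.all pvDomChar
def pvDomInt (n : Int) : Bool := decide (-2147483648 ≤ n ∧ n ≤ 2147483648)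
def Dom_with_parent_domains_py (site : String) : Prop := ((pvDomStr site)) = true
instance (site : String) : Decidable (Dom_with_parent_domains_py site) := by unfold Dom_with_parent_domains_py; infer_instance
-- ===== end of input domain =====

-- B replaces A's strip-one-label-at-a-time while-loop (try/except IndexError) by one full
-- split('.') followed by rejoining each index suffix; objective: simpler (same cost).

-- ===== PORT A =====
-- A's while-loop as fuel recursion; each iteration strips everything up to the first '.',
-- so site.toList.length + 1 fuel always suffices (proved in the lemmas below).
def aGo : Nat → String → List (Option String) → List (Option String)
  | 0, _, sites => sites
  | fuel+1, site, sites =>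
    if site = "" then sites
    else
      match PySem.Str.splitMax? site "." 1 with
      | none => sites          -- unreachable: separator "." is nonempty
      | some parts =>
        match PySem.List.pyGet? parts 1 with
        | none => sites        -- IndexError → break
        | some rest => aGo fuel rest (sites ++ [some rest])

def with_parent_domains_py (site : String) : List (Option String) :=
  aGo (site.toList.length + 1) site [some site] ++ [none]

-- ===== PORT B =====
def with_parent_domains_py_alt (site : String) : List (Option String) :=
  let labels := (PySem.Str.split? site ".").getD []   -- site.split('.'); some since "." ≠ ""
  (PySem.List.pyRange 0 (labels.length : Int) 1).map
      (fun i => some (PySem.Str.join "." (PySem.List.slice labels (some i) none)))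
    ++ [none]

-- ===== PRECONDITION & SPEC =====
def Spec_with_parent_domains_py (site : String) (out : List (Option String)) : Prop := out = with_parent_domains_py_alt site
instance (site : String) (out : List (Option String)) : Decidable (Spec_with_parent_domains_py site out) := by unfold Spec_with_parent_domains_py; infer_instance

-- ===== CLAIM (what is proved, stated in full; the proofs are below) =====
def Claim_equal_with_parent_domains_py : Prop := ∀ (site : String), Dom_with_parent_domains_py site → Spec_with_parent_domains_py site (with_parent_domains_py site)

-- ===== LEMMAS AND PROOFS =====

-- structural split on '.' (reference function for both proofs)
def splitDot : List Char → List (List Char)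
  | [] => [[]]
  | c :: rest =>
    if c = '.' then [] :: splitDot rest
    else
      match splitDot rest with
      | [] => [[c]]
      | p :: ps => (c :: p) :: ps

-- the successive dot-joined suffixes of a label list
def joins : List (List Char) → List (List Char)
  | [] => []
  | l :: ls => List.intercalate ['.'] (l :: ls) :: joins ls

theorem splitDot_ne_nil (cs : List Char) : splitDot cs ≠ [] := by
  induction cs with
  | nil => simp [splitDot]
  | cons c rest ih =>
    simp only [splitDot]
    split
    · simp
    · cases h : splitDot rest <;> simp

theorem splitDot_no_dot (cs : List Char) (h : '.' ∉ cs) : splitDot cs = [cs] := by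
  induction cs with
  | nil => rfl
  | cons c rest ih =>
    have hc : c ≠ '.' := by intro hc; exact h (hc ▸ List.mem_cons_self)
    have hr : '.' ∉ rest := fun hm => h (List.mem_cons_of_mem _ hm)
    simp only [splitDot, if_neg hc, ih hr]

theorem splitDot_append (pre rest : List Char) (h : '.' ∉ pre) :
    splitDot (pre ++ '.' :: rest) = pre :: splitDot rest := by
  induction pre with
  | nil => simp [splitDot]
  | cons c p ih =>
    have hc : c ≠ '.' := by intro hc; exact h (hc ▸ List.mem_cons_self)
    have hp : '.' ∉ p := fun hm => h (List.mem_cons_of_mem _ hm)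
    simp only [List.cons_append, splitDot, if_neg hc, ih hp]

theorem intercalate_cons_char (c : Char) (p : List Char) (ps : List (List Char)) :
    List.intercalate ['.'] ((c :: p) :: ps) = c :: List.intercalate ['.'] (p :: ps) := by
  cases ps <;> simp [List.intercalate, List.intersperse]

theorem intercalate_splitDot (cs : List Char) : List.intercalate ['.'] (splitDot cs) = cs := by
  induction cs with
  | nil => simp [splitDot, List.intercalate]
  | cons c rest ih =>
    by_cases hc : c = '.'
    · subst hc
      simp only [splitDot, if_pos]
      cases h : splitDot rest with
      | nil => exact absurd h (splitDot_ne_nil rest)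
      | cons q qs =>
        rw [h] at ih
        simpa [List.intercalate, List.intersperse] using ih
    · simp only [splitDot, if_neg hc]
      cases h : splitDot rest with
      | nil => exact absurd h (splitDot_ne_nil rest)
      | cons q qs =>
        rw [h] at ih
        rw [intercalate_cons_char, ih]

-- splitOnMax.go with the split budget exhausted
theorem go_zero (sep : List Char) (fuel : Nat) (l cur : List Char) (acc : List (List Char)) :
    PySem.Chars.splitOnMax.go sep fuel 0 l cur acc = ((cur.reverse ++ l) :: acc).reverse := by
  cases fuel <;> cases l <;> simp [PySem.Chars.splitOnMax.go]

-- splitOnMax.go with budget 1: split once at the first '.', if any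
theorem go_one (l : List Char) : ∀ (fuel : Nat) (cur : List Char) (acc : List (List Char)),
    l.length ≤ fuel →
    PySem.Chars.splitOnMax.go ['.'] fuel 1 l cur acc =
      if '.' ∈ l then
        acc.reverse ++ [cur.reverse ++ l.takeWhile (· ≠ '.'), (l.dropWhile (· ≠ '.')).tail]
      else acc.reverse ++ [cur.reverse ++ l] := by
  induction l with
  | nil =>
    intro fuel cur acc _
    cases fuel <;> simp [PySem.Chars.splitOnMax.go]
  | cons c rest ih =>
    intro fuel cur acc hf
    cases fuel with
    | zero => simp at hf
    | succ f =>
      by_cases hc : c = '.'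
      · subst hc
        have hpre : List.isPrefixOf ['.'] ('.' :: rest) = true := by
          simp [List.isPrefixOf]
        simp only [PySem.Chars.splitOnMax.go, if_neg (by norm_num : ¬ (1 = 0)), hpre, if_pos]
        rw [go_zero]
        simp [List.takeWhile, List.dropWhile]
      · have hpre : List.isPrefixOf ['.'] (c :: rest) = false := by
          simp [List.isPrefixOf]; exact fun h => (hc h.symm).elim
        simp only [PySem.Chars.splitOnMax.go, if_neg (by norm_num : ¬ (1 = 0)), hpre]
        rw [if_neg (by simp), ih f (c :: cur) acc (by simpa using Nat.le_of_succ_le_succ hf)]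
        by_cases hm : '.' ∈ rest
        · have hm' : '.' ∈ c :: rest := List.mem_cons_of_mem _ hm
          simp [hm, hm', List.takeWhile, List.dropWhile, hc]
        · have hm' : '.' ∉ c :: rest := by
            intro h; rcases List.mem_cons.mp h with h | h
            · exact hc h.symm
            · exact hm h
          simp [hm, hm']

theorem splitOnMax_one (cs : List Char) :
    PySem.Chars.splitOnMax cs ['.'] 1 =
      if '.' ∈ cs then [cs.takeWhile (· ≠ '.'), (cs.dropWhile (· ≠ '.')).tail] else [cs] := by
  have h := go_one cs (cs.length + 1) [] [] (Nat.le_succ _)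
  simp only [PySem.Chars.splitOnMax, if_neg (by norm_num : ¬ (1:Int) < 0)] at *
  simpa using h

-- splitOn.go computes splitDot
theorem goS (l : List Char) : ∀ (fuel : Nat) (cur : List Char) (acc : List (List Char)),
    l.length ≤ fuel →
    PySem.Chars.splitOn.go ['.'] fuel l cur acc =
      acc.reverse ++ ((cur.reverse ++ (splitDot l).headI) :: (splitDot l).tail) := by
  induction l with
  | nil =>
    intro fuel cur acc _
    cases fuel <;> simp [PySem.Chars.splitOn.go, splitDot]
  | cons c rest ih =>
    intro fuel cur acc hf
    cases fuel with
    | zero => simp at hf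
    | succ f =>
      by_cases hc : c = '.'
      · subst hc
        have hpre : List.isPrefixOf ['.'] ('.' :: rest) = true := by simp [List.isPrefixOf]
        simp only [PySem.Chars.splitOn.go, hpre, if_pos]
        rw [show List.drop ['.'].length ('.' :: rest) = rest from rfl,
            ih f [] (List.reverse cur :: acc) (by simpa using Nat.le_of_succ_le_succ hf)]
        cases h : splitDot rest with
        | nil => exact absurd h (splitDot_ne_nil rest)
        | cons q qs => simp [splitDot, h]
      · have hpre : List.isPrefixOf ['.'] (c :: rest) = false := by
          simp [List.isPrefixOf]; exact fun h => (hc h.symm).elim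
        simp only [PySem.Chars.splitOn.go, hpre]
        rw [if_neg (by simp), ih f (c :: cur) acc (by simpa using Nat.le_of_succ_le_succ hf)]
        cases h : splitDot rest with
        | nil => exact absurd h (splitDot_ne_nil rest)
        | cons q qs => simp [splitDot, hc, h]

theorem splitOn_eq_splitDot (cs : List Char) : PySem.Chars.splitOn cs ['.'] = splitDot cs := by
  have h := goS cs (cs.length + 1) [] [] (Nat.le_succ _)
  simp only [PySem.Chars.splitOn] at *
  rw [h]
  cases hs : splitDot cs with
  | nil => exact absurd hs (splitDot_ne_nil cs)
  | cons q qs => simp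

-- joins as an index map over suffixes
theorem joins_eq_range (ls : List (List Char)) :
    joins ls = (List.range ls.length).map (fun i => List.intercalate ['.'] (ls.drop i)) := by
  induction ls with
  | nil => rfl
  | cons l ls ih =>
    simp only [joins, List.length_cons, List.range_succ_eq_map, List.map_cons, List.map_map,
      List.drop_zero]
    refine congrArg (List.intercalate ['.'] (l :: ls) :: ·) ?_
    rw [ih]
    rfl

-- pyRange 0 n 1 is range n cast to Int
theorem pyRange_zero_nat (n : Nat) :
    PySem.List.pyRange 0 (n : Int) 1 = (List.range n).map (fun i : Nat => (i : Int)) := by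
  suffices h : ∀ (k n : Nat), PySem.List.pyRange (k : Int) ((k + n : Nat) : Int) 1 =
      ((List.range n).map (fun i => ((k + i : Nat) : Int))) by
    have h0 := h 0 n
    simp only [Nat.zero_add, Nat.cast_zero] at h0
    exact h0
  intro k n
  induction n generalizing k with
  | zero => simp [PySem.List.pyRange]
  | succ m ih =>
    rw [PySem.List.pyRange_one_cons (by push_cast; omega)]
    rw [show ((k : Int) + 1) = ((k + 1 : Nat) : Int) by push_cast; ring,
      show ((k + (m + 1) : Nat) : Int) = (((k + 1) + m : Nat) : Int) by push_cast; ring,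
      ih (k + 1), List.range_succ_eq_map, List.map_cons, List.map_map]
    refine congrArg₂ List.cons (by push_cast; ring) ?_
    refine List.map_congr_left fun i _ => ?_
    simp only [Function.comp]
    push_cast
    ring

-- the decomposition at the first dot
theorem first_dot (cs : List Char) (h : '.' ∈ cs) :
    '.' ∉ cs.takeWhile (· ≠ '.') ∧
    cs = cs.takeWhile (· ≠ '.') ++ '.' :: (cs.dropWhile (· ≠ '.')).tail := by
  have hne : cs.dropWhile (· ≠ '.') ≠ [] := by
    intro hnil
    rw [List.dropWhile_eq_nil_iff] at hnil
    have := hnil '.' h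
    simp at this
  constructor
  · intro hm
    have := List.mem_takeWhile_imp hm
    simp at this
  · cases hdw : cs.dropWhile (· ≠ '.') with
    | nil => exact absurd hdw hne
    | cons d t =>
      have hd : d = '.' := by
        have h2 := List.head_dropWhile_not (fun c => decide (c ≠ '.')) hne
        simp only [hdw, List.head_cons, decide_eq_false_iff_not, not_not] at h2
        exact h2
      subst hd
      conv_lhs => rw [← List.takeWhile_append_dropWhile (p := fun c => decide (c ≠ '.')) (l := cs), hdw]
      simp

-- A's loop produces the tail of the suffix-join list
theorem aGo_eq (n : Nat) : ∀ (cs : List Char) (sites : List (Option String)), cs.length < n →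
    aGo n (String.ofList cs) sites =
      sites ++ (joins (splitDot cs)).tail.map (fun l => some (String.ofList l)) := by
  induction n with
  | zero => intro cs sites h; omega
  | succ m ih =>
    intro cs sites h
    cases cs with
    | nil => simp [aGo, joins, splitDot, List.intercalate]
    | cons c rest =>
      have hne : String.ofList (c :: rest) ≠ "" := by
        intro hh
        have := congrArg String.toList hh
        simp at this
      simp only [aGo, if_neg hne]
      have hsplit : PySem.Str.splitMax? (String.ofList (c :: rest)) "." 1 =
          some ((PySem.Chars.splitOnMax (c :: rest) ['.'] 1).map String.ofList) := by
        simp [PySem.Str.splitMax?, PySem.Chars.splitMax?]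
      rw [hsplit, splitOnMax_one]
      set cs := c :: rest with hcs
      by_cases hm : '.' ∈ cs
      · rw [if_pos hm]
        obtain ⟨hpre, hdec⟩ := first_dot cs hm
        set pre := cs.takeWhile (· ≠ '.') with hpre'
        set rst := (cs.dropWhile (· ≠ '.')).tail with hrst
        have hlen : rst.length < cs.length := by
          rw [hdec]
          simp only [List.length_append, List.length_cons]
          omega
        have hget : PySem.List.pyGet? [String.ofList pre, String.ofList rst] (1 : Int) =
            some (String.ofList rst) := by rfl
        simp only [List.map_cons, List.map_nil, hget]
        rw [ih rst (sites ++ [some (String.ofList rst)]) (by omega)]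
        rw [show splitDot cs = pre :: splitDot rst by rw [hdec] at hm ⊢; exact splitDot_append _ _ hpre]
        cases hq : splitDot rst with
        | nil => exact absurd hq (splitDot_ne_nil rst)
        | cons q qs =>
          have hj : List.intercalate ['.'] (q :: qs) = rst := by
            rw [← hq]; exact intercalate_splitDot rst
          simp [joins, hj]
      · rw [if_neg hm]
        have hget : PySem.List.pyGet? [String.ofList cs] (1 : Int) = none := by rfl
        simp only [List.map_cons, List.map_nil, hget]
        rw [splitDot_no_dot cs hm]
        simp [joins]

-- A computes the full suffix-join list
theorem portA_eq (site : String) :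
    with_parent_domains_py site =
      (joins (splitDot site.toList)).map (fun l => some (String.ofList l)) ++ [none] := by
  unfold with_parent_domains_py
  have h := aGo_eq (site.toList.length + 1) site.toList [some site] (Nat.lt_succ_self _)
  rw [String.ofList_toList] at h
  rw [h]
  cases hq : splitDot site.toList with
  | nil => exact absurd hq (splitDot_ne_nil site.toList)
  | cons q qs =>
    have hj : List.intercalate ['.'] (q :: qs) = site.toList := by
      rw [← hq]; exact intercalate_splitDot site.toList
    simp [joins, hj, String.ofList_toList]

-- B computes the same list
theorem portB_eq (site : String) :
    with_parent_domains_py_alt site =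
      (joins (splitDot site.toList)).map (fun l => some (String.ofList l)) ++ [none] := by
  unfold with_parent_domains_py_alt
  have hlab : (PySem.Str.split? site ".").getD [] = (splitDot site.toList).map String.ofList := by
    simp [PySem.Str.split?, PySem.Chars.split?]
    rw [splitOn_eq_splitDot]
  rw [hlab]
  simp only [List.length_map]
  rw [pyRange_zero_nat, List.map_map, joins_eq_range, List.map_map]
  refine congrArg (· ++ [(none : Option String)]) ?_
  refine List.map_congr_left ?_
  intro i hi
  simp only [Function.comp]
  rw [PySem.List.slice_from _ (by positivity)]
  simp only [Int.toNat_natCast, ← List.map_drop]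
  congr 1
  simp [PySem.Str.join, PySem.Chars.join, List.map_map]
  rw [show (String.toList ∘ String.ofList) = (id : List Char → List Char) from
        funext fun l => String.toList_ofList,
    List.map_id]

-- ===== VERDICT (by name: the statement is the Claim_ definition above) =====
theorem with_parent_domains_py_spec : Claim_equal_with_parent_domains_py := by
  intro site _
  unfold Spec_with_parent_domains_py
  rw [portA_eq, portB_eq]
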